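-- pv_equiv track=rewrite | github.com/DanielaMendozaA/sub_palindrome | maximun_sub_palindrome.py | sub_pal_per_space
-- ===== SOURCE A (Python) =====
-- def sub_pal_per_space(string):
--     # Convert the string to lowercase to ensure case-insensitive comparison
--     lowerString = string.lower()
--     # Add a space at the end to ensure the last word is processed
--     lowerString += " "
--     arraySetWords = set()
--     # Initialize an empty array to store tuples of start and end indices of palindromes
--     newArray = []
--
--     # Helper function to check if a given word is a palindrome
--     def validate_palindrome(word):
--         # Compare the word with its reverse
--         return word == word[::-1]
--
--     # Variable to build the current word
--     newWord = ""
--     # Variable to track the start index of the current word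
--     start = 0
--
--     # Iterate through each character in the string
--     for end in range(len(lowerString)):
--         # If the current character is not a space, add it to the current word
--         if(lowerString[end] != " "):
--             newWord += lowerString[end]
--         else:
--             # If a word exists, check if it's a palindrome
--             if newWord and len(newWord) >= 3:
--                 isP = validate_palindrome(newWord)
--                 # If the word is a palindrome, store its start and end indices as a tuple
--                 if isP and not newWord in arraySetWords:
--                     tupla = (start, end - 1)
--                     newArray.append(tupla)
--                     arraySetWords.add(newWord)
--             # Reset the current word for the next iteration
--             newWord = ""
--             # Update the start index for the next word
--             start = end + 1
--
--     # Return the sorted list of tuples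
--     return newArray
-- ===== SOURCE B (Python) =====
-- def sub_pal_per_space(string):
--     s = string.lower()
--     n = len(s)
--     seen = set()
--     out = []
--     i = 0
--     while i < n:
--         if s[i] == ' ':
--             i += 1
--             continue
--         j = i
--         while j < n and s[j] != ' ':
--             j += 1
--         w = s[i:j]
--         if len(w) >= 3 and w == w[::-1] and w not in seen:
--             out.append((i, j - 1))
--             seen.add(w)
--         i = j
--     return out
-- ===== Notes on version B (the rewrite author's own statement) =====
-- stated objective: simpler
-- what changed: B replaces A's character-by-character word accumulator (building each word one char at a time with four pieces of loop state) by a two-pointer run scanner: skip spaces, find the end of the run of non-space characters, slice the word out and test it once.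
import Mathlib
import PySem

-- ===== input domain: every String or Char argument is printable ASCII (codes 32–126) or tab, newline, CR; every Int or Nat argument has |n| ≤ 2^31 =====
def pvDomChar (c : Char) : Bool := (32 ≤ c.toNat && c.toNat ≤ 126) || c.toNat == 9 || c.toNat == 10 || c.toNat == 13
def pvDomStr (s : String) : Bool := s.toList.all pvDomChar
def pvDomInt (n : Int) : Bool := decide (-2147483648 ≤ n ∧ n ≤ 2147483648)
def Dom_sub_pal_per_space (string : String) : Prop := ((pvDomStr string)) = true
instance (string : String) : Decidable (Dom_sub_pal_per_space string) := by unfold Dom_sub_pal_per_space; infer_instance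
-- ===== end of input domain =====

-- B replaces A's char-by-char word accumulator with a two-pointer run scanner (same O(n) cost, plainer loop).


-- ===== PORT A =====
-- A's for-loop over the indices of lowerString: state = (current word, its start, seen set, result list).
def pvALoop (cs : List Char) (endIdx : Int) (newWord : List Char) (start : Int)
    (seen : PySem.Set (List Char)) (acc : List (Int × Int)) : List (Int × Int) :=
  match cs with
  | [] => acc
  | c :: rest =>
    if c ≠ ' ' then
      pvALoop rest (endIdx + 1) (newWord ++ [c]) start seen acc
    else
      if newWord ≠ [] ∧ 3 ≤ newWord.length then
        let isP := newWord = newWord.reverse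
        if isP ∧ ¬ (PySem.Set.contains seen newWord = true) then
          pvALoop rest (endIdx + 1) [] (endIdx + 1) (PySem.Set.add seen newWord)
            (acc ++ [(start, endIdx - 1)])
        else pvALoop rest (endIdx + 1) [] (endIdx + 1) seen acc
      else pvALoop rest (endIdx + 1) [] (endIdx + 1) seen acc

def sub_pal_per_space (string : String) : List (Int × Int) :=
  pvALoop (PySem.Chars.lower string.toList ++ [' ']) 0 [] 0 PySem.Set.empty []

-- ===== PORT B =====
-- B's while-loop: skip a space, or take the whole run of non-space chars (the word s[i:j]) at once.
def pvBLoop (cs : List Char) (i : Int) (seen : PySem.Set (List Char)) (out : List (Int × Int)) :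
    List (Int × Int) :=
  match cs with
  | [] => out
  | c :: rest =>
    if c = ' ' then pvBLoop rest (i + 1) seen out
    else
      let w := List.takeWhile (fun x => x != ' ') (c :: rest)
      let r := List.dropWhile (fun x => x != ' ') (c :: rest)
      let j := i + w.length
      if 3 ≤ w.length ∧ w = w.reverse ∧ ¬ (PySem.Set.contains seen w = true) then
        pvBLoop r j (PySem.Set.add seen w) (out ++ [(i, j - 1)])
      else pvBLoop r j seen out
termination_by cs.length
decreasing_by
  · simp
  · simp [*]
    exact List.length_dropWhile_le _ _
  · simp [*]
    exact List.length_dropWhile_le _ _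

def sub_pal_per_space_alt (string : String) : List (Int × Int) :=
  pvBLoop (PySem.Chars.lower string.toList) 0 PySem.Set.empty []

-- ===== PRECONDITION & SPEC =====
def Spec_sub_pal_per_space (string : String) (out : List (Int × Int)) : Prop := out = sub_pal_per_space_alt string
instance (string : String) (out : List (Int × Int)) : Decidable (Spec_sub_pal_per_space string out) := by unfold Spec_sub_pal_per_space; infer_instance

-- ===== CLAIM (what is proved, stated in full; the proofs are below) =====
def Claim_equal_sub_pal_per_space : Prop := ∀ (string : String), Dom_sub_pal_per_space string → Spec_sub_pal_per_space string (sub_pal_per_space string)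

-- ===== LEMMAS AND PROOFS =====

-- Feeding a run of non-space characters into A's loop just appends them to the current word.
theorem pvALoop_run (w : List Char) (hw : ∀ x ∈ w, x ≠ ' ') :
    ∀ (t : List Char) (endIdx : Int) (nw : List Char) (start : Int)
      (seen : PySem.Set (List Char)) (acc : List (Int × Int)),
      pvALoop (w ++ ' ' :: t) endIdx nw start seen acc
        = pvALoop (' ' :: t) (endIdx + w.length) (nw ++ w) start seen acc := by
  induction w with
  | nil => intro t endIdx nw start seen acc; simp
  | cons c w ih =>
    intro t endIdx nw start seen acc
    have hc : c ≠ ' ' := hw c (by simp)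
    rw [List.cons_append, pvALoop]
    simp only [hc, ne_eq, not_false_eq_true, if_pos]
    rw [ih (fun x hx => hw x (by simp [hx]))]
    congr 1 <;> (simp; try ring)

theorem pvBLoop_nil (i : Int) (seen : PySem.Set (List Char)) (out : List (Int × Int)) :
    pvBLoop [] i seen out = out := by rw [pvBLoop]

theorem pvBLoop_space (r : List Char) (i : Int) (seen : PySem.Set (List Char))
    (out : List (Int × Int)) : pvBLoop (' ' :: r) i seen out = pvBLoop r (i + 1) seen out := by
  rw [pvBLoop]; simp

-- Main invariant: A's loop on cs ++ [' '] (empty current word, start = endIdx) equals B's loop on cs.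
theorem pvLoop_agree (n : Nat) : ∀ (cs : List Char), cs.length ≤ n →
    ∀ (i : Int) (seen : PySem.Set (List Char)) (acc : List (Int × Int)),
      pvALoop (cs ++ [' ']) i [] i seen acc = pvBLoop cs i seen acc := by
  induction n with
  | zero =>
    intro cs hcs i seen acc
    have : cs = [] := List.eq_nil_of_length_eq_zero (Nat.le_zero.mp hcs)
    subst this
    simp [pvALoop, pvBLoop]
  | succ n ih =>
    intro cs hcs i seen acc
    match cs with
    | [] => simp [pvALoop, pvBLoop]
    | c :: rest =>
      by_cases hc : c = ' '
      · subst hc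
        rw [List.cons_append, pvALoop, pvBLoop]
        simp only [ne_eq, not_true_eq_false, if_false]
        rw [if_neg (by simp)]
        exact ih rest (by simpa using Nat.lt_succ_iff.mp (Nat.lt_of_lt_of_le (Nat.lt_succ_self _) hcs)) (i + 1) seen acc
      · -- non-space head: one whole word
        rw [pvBLoop]
        simp only [if_neg hc]
        set p : Char → Bool := fun x => x != ' ' with hp
        have hpc : p c = true := by simp [hp, hc]
        set w := List.takeWhile p (c :: rest) with hwdef
        set r := List.dropWhile p (c :: rest) with hrdef
        have hsplit : w ++ r = c :: rest := List.takeWhile_append_dropWhile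
        have hwne : w = c :: List.takeWhile p rest := by
          rw [hwdef, List.takeWhile_cons_of_pos hpc]
        have hwall : ∀ x ∈ w, x ≠ ' ' := by
          intro x hx
          have := List.mem_takeWhile_imp (hwdef ▸ hx)
          simpa [hp] using this
        have hw0 : w ≠ [] := by rw [hwne]; simp
        have hlhs : (c :: rest) ++ [' '] = w ++ (r ++ [' ']) := by
          rw [← hsplit, List.append_assoc]
        clear_value w r
        obtain _ | ⟨h, r'⟩ := r
        · -- word runs to the end of the string
          rw [hlhs, List.nil_append, pvALoop_run w hwall]
          rw [pvALoop]
          simp only [ne_eq, not_true_eq_false, if_false, List.nil_append, pvALoop, pvBLoop_nil]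
          split_ifs with h1 h2 h3 <;> first | rfl | tauto
        · -- word followed by a delimiting space and the tail r'
          have hh : h = ' ' := by
            have hne2 : List.dropWhile p (c :: rest) ≠ [] := by rw [← hrdef]; simp
            have hhd := List.head_dropWhile_not (p := p) (l := c :: rest) hne2
            have hhead : (List.dropWhile p (c :: rest)).head hne2 = h := by
              simp [← hrdef]
            rw [hhead] at hhd
            simpa [hp] using hhd
          subst hh
          have hlen : r'.length + 1 ≤ n := by
            have h1 := congrArg List.length hsplit
            simp only [List.length_append, List.length_cons] at h1
            have h2 : 1 ≤ w.length := by rw [hwne]; simp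
            simp only [List.length_cons] at hcs
            omega
          have hih : ∀ seen₂ acc₂, pvALoop (r' ++ [' ']) (i + ↑w.length + 1) [] (i + ↑w.length + 1) seen₂ acc₂
              = pvBLoop r' (i + ↑w.length + 1) seen₂ acc₂ := fun seen₂ acc₂ => ih r' (by omega) _ seen₂ acc₂
          rw [hlhs, List.cons_append, pvALoop_run w hwall]
          rw [pvALoop]
          simp only [ne_eq, not_true_eq_false, if_false, List.nil_append, hih, pvBLoop_space]
          split_ifs with h1 h2 h3 <;> first | rfl | tauto

-- ===== VERDICT (by name: the statement is the Claim_ definition above) =====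
theorem sub_pal_per_space_spec : Claim_equal_sub_pal_per_space := by
  intro string _
  unfold Spec_sub_pal_per_space sub_pal_per_space sub_pal_per_space_alt
  exact pvLoop_agree _ _ (le_refl _) 0 PySem.Set.empty []
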